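-- pv_equiv track=rewrite | github.com/danielmao2019/Pylon | models/three_d/octree_gs/scene_model.py | _sanitize_levels
-- ===== SOURCE A (Python) =====
-- from typing import Any, List, Optional, Tuple
--
-- def _sanitize_levels(levels: Optional[List[Any]], total_levels: int) -> List[int]:
--     if levels is None:
--         return list(range(total_levels))
--     assert isinstance(levels, list), f"{type(levels)=}"
--     sanitized = sorted(
--         {int(level) for level in levels if 0 <= int(level) < total_levels}
--     )
--     assert sanitized, "Level selection must not be empty"
--     return sanitized
-- ===== SOURCE B (Python) =====
-- from typing import Any, List, Optional
--
-- def _sanitize_levels(levels: Optional[List[Any]], total_levels: int) -> List[int]: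
--     if levels is None:
--         return list(range(total_levels))
--     assert isinstance(levels, list), f"{type(levels)=}"
--     ordered = sorted(int(level) for level in levels)
--     sanitized: List[int] = []
--     for v in ordered:
--         if 0 <= v < total_levels and (not sanitized or sanitized[-1] != v):
--             sanitized.append(v)
--     assert sanitized, "Level selection must not be empty"
--     return sanitized
-- ===== Notes on version B (the rewrite author's own statement) =====
-- stated objective: alternative
-- what changed: Replaces the set-comprehension-then-sorted() pipeline by sorting the raw levels first and then a single scan that filters the range and deduplicates by comparing each value with the last kept one, so no set is built.
import Mathlib
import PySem

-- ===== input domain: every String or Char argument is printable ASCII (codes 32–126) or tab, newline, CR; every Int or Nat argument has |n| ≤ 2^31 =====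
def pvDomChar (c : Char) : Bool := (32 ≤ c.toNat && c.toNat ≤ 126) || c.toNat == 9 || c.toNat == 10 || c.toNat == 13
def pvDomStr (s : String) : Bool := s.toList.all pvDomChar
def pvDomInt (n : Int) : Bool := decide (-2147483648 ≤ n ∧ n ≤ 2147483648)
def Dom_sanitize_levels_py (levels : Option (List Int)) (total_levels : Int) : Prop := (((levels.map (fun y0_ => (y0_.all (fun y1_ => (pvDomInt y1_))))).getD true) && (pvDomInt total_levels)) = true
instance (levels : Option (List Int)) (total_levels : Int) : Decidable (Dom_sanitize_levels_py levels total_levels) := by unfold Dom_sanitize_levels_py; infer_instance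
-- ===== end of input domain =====

-- B sorts the raw levels first and deduplicates by an adjacent-comparison scan instead of building a set and sorting it; equal output on Pre_.

-- ===== PORT A =====
def sanitize_levels_py (levels : Option (List Int)) (total_levels : Int) : List Int :=
  match levels with
  | none => PySem.List.pyRange 0 total_levels 1
  | some l =>
      -- sanitized = sorted({int(level) for level in levels if 0 <= int(level) < total_levels})
      PySem.List.sorted
        (PySem.Set.ofList (l.filter (fun v => decide (0 ≤ v ∧ v < total_levels))))
        (fun x => x) false

-- ===== PORT B =====
def sanitize_levels_py_alt (levels : Option (List Int)) (total_levels : Int) : List Int :=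
  match levels with
  | none => PySem.List.pyRange 0 total_levels 1
  | some l =>
      -- ordered = sorted(int(level) for level in levels); then one scan: keep v if in range and != last kept
      let ordered := PySem.List.sorted l (fun x => x) false
      ordered.foldl
        (fun (sanitized : List Int) v =>
          if 0 ≤ v ∧ v < total_levels ∧ sanitized.getLast? ≠ some v
          then sanitized ++ [v] else sanitized)
        []

-- ===== PRECONDITION & SPEC =====
-- Pre_ excludes exactly the inputs where A raises AssertionError: a non-None levels list with
-- no element in [0, total_levels) ("Level selection must not be empty"); B raises there too.
def Pre_sanitize_levels_py (levels : Option (List Int)) (total_levels : Int) : Prop :=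
  ∀ l ∈ levels, ∃ v ∈ l, 0 ≤ v ∧ v < total_levels
instance (levels : Option (List Int)) (total_levels : Int) : Decidable (Pre_sanitize_levels_py levels total_levels) := by unfold Pre_sanitize_levels_py; infer_instance

def pvWitness_sanitize_levels_py : Option (List Int) × Int := (some [2, 0, 2], 3)

def Spec_sanitize_levels_py (levels : Option (List Int)) (total_levels : Int) (out : List Int) : Prop := out = sanitize_levels_py_alt levels total_levels
instance (levels : Option (List Int)) (total_levels : Int) (out : List Int) : Decidable (Spec_sanitize_levels_py levels total_levels out) := by unfold Spec_sanitize_levels_py; infer_instance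

-- ===== CLAIM (what is proved, stated in full; the proofs are below) =====
def Claim_equal_sanitize_levels_py : Prop := ∀ (levels : Option (List Int)) (total_levels : Int), Dom_sanitize_levels_py levels total_levels → Pre_sanitize_levels_py levels total_levels → Spec_sanitize_levels_py levels total_levels (sanitize_levels_py levels total_levels)

-- ===== LEMMAS AND PROOFS =====

-- in a <-sorted list an upper-bound member is the last element
lemma getLast?_of_mem_max (acc : List Int) (v : Int) (h : v ∈ acc)
    (hp : acc.Pairwise (· < ·)) (hmax : ∀ a ∈ acc, a ≤ v) : acc.getLast? = some v := by
  induction acc with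
  | nil => simp at h
  | cons a as ih =>
    rcases List.mem_cons.mp h with hv | hv
    · subst hv
      have : as = [] := by
        cases as with
        | nil => rfl
        | cons b bs =>
          have h1 : v < b := (List.pairwise_cons.mp hp).1 b (by simp)
          have h2 : b ≤ v := hmax b (by simp)
          omega
      simp [this]
    · have hne : as ≠ [] := List.ne_nil_of_mem hv
      have : (a :: as).getLast? = as.getLast? := by
        cases as with
        | nil => exact absurd rfl hne
        | cons b bs => simp [List.getLast?]
      rw [this]
      exact ih hv (List.pairwise_cons.mp hp).2 (fun a ha => hmax a (List.mem_cons_of_mem _ ha))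

-- B's scan over a ≤-sorted list, started from a <-sorted accumulator bounded by the rest,
-- yields a <-sorted list whose members are the accumulator's plus the in-range elements scanned.
lemma scan_spec (t : Int) (ys : List Int) : ∀ (acc : List Int),
    ys.Pairwise (· ≤ ·) → acc.Pairwise (· < ·) →
    (∀ a ∈ acc, ∀ y ∈ ys, a ≤ y) →
    ((ys.foldl
        (fun (s : List Int) v => if 0 ≤ v ∧ v < t ∧ s.getLast? ≠ some v then s ++ [v] else s)
        acc).Pairwise (· < ·)
      ∧ ∀ x, x ∈ ys.foldl
        (fun (s : List Int) v => if 0 ≤ v ∧ v < t ∧ s.getLast? ≠ some v then s ++ [v] else s)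
        acc ↔ x ∈ acc ∨ (x ∈ ys ∧ 0 ≤ x ∧ x < t)) := by
  induction ys with
  | nil => intro acc _ hacc _; simpa using hacc
  | cons v ys ih =>
    intro acc hys hacc hbnd
    have hvy : ∀ y ∈ ys, v ≤ y := (List.pairwise_cons.mp hys).1
    have hys' : ys.Pairwise (· ≤ ·) := (List.pairwise_cons.mp hys).2
    simp only [List.foldl_cons]
    by_cases hc : 0 ≤ v ∧ v < t ∧ acc.getLast? ≠ some v
    · rw [if_pos hc]
      have haccv : ∀ a ∈ acc, a < v := by
        intro a ha
        have hle : a ≤ v := hbnd a ha v (by simp)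
        rcases lt_or_eq_of_le hle with h | h
        · exact h
        · exfalso
          subst h
          exact hc.2.2 (getLast?_of_mem_max acc a ha hacc (fun b hb => hbnd b hb a (by simp)))
      have hacc' : (acc ++ [v]).Pairwise (· < ·) := by
        rw [List.pairwise_append]
        exact ⟨hacc, by simp, by simpa using haccv⟩
      have hbnd' : ∀ a ∈ acc ++ [v], ∀ y ∈ ys, a ≤ y := by
        intro a ha y hy
        rcases List.mem_append.mp ha with h | h
        · exact hbnd a h y (List.mem_cons_of_mem _ hy)
        · simp at h; subst h; exact hvy y hy
      obtain ⟨hp, hm⟩ := ih (acc ++ [v]) hys' hacc' hbnd'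
      refine ⟨hp, fun x => ?_⟩
      rw [hm x]
      simp only [List.mem_append, List.mem_cons,
        List.not_mem_nil, or_false]
      constructor
      · rintro ((h | h) | h)
        · exact Or.inl h
        · exact Or.inr ⟨Or.inl h, h ▸ ⟨hc.1, hc.2.1⟩⟩
        · exact Or.inr ⟨Or.inr h.1, h.2⟩
      · rintro (h | ⟨h | h, hr⟩)
        · exact Or.inl (Or.inl h)
        · exact Or.inl (Or.inr h)
        · exact Or.inr ⟨h, hr⟩
    · rw [if_neg hc]
      have hbnd' : ∀ a ∈ acc, ∀ y ∈ ys, a ≤ y :=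
        fun a ha y hy => hbnd a ha y (List.mem_cons_of_mem _ hy)
      obtain ⟨hp, hm⟩ := ih acc hys' hacc hbnd'
      refine ⟨hp, fun x => ?_⟩
      rw [hm x]
      simp only [List.mem_cons]
      constructor
      · rintro (h | ⟨h, hr⟩)
        · exact Or.inl h
        · exact Or.inr ⟨Or.inr h, hr⟩
      · rintro (h | ⟨h | h, hr⟩)
        · exact Or.inl h
        · -- x = v kept out only because it is already the last of acc
          subst h
          have : acc.getLast? = some x := by
            by_contra hne
            exact hc ⟨hr.1, hr.2, hne⟩
          exact Or.inl (List.mem_of_getLast? this)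
        · exact Or.inr ⟨h, hr⟩

lemma alt_eq_sorted (l : List Int) (t : Int) :
    sanitize_levels_py (some l) t = sanitize_levels_py_alt (some l) t := by
  simp only [sanitize_levels_py, sanitize_levels_py_alt]
  set xsf := l.filter (fun v => decide (0 ≤ v ∧ v < t)) with hxsf
  obtain ⟨hpw, hmem⟩ := scan_spec t (PySem.List.sorted l (fun x => x) false) []
    (PySem.List.sorted_pairwise l (fun x => x)) List.Pairwise.nil (by simp)
  apply PySem.List.sorted_eq_of_perm_of_pairwise_lt
  · rw [List.perm_ext_iff_of_nodup (hpw.imp fun h => ne_of_lt h) (PySem.Set.nodup_ofList xsf)]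
    intro x
    rw [hmem x, PySem.Set.mem_ofList, hxsf, List.mem_filter]
    simp [PySem.List.mem_sorted, and_comm]
  · exact hpw

-- ===== VERDICT (by name: the statement is the Claim_ definition above) =====
theorem sanitize_levels_py_spec : Claim_equal_sanitize_levels_py := by
  intro levels t _ _
  unfold Spec_sanitize_levels_py
  match levels with
  | none => rfl
  | some l => exact alt_eq_sorted l t
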